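-- pv_equiv track=rewrite | github.com/dudehowdoufeel/python2 | hw6/7.py | compute_Psi
-- ===== SOURCE A (Python) =====
-- MOD = 1_000_000_007
--
-- def compute_Psi(m):
--     psi_3 = 7
--     current_psi = psi_3
--     total_Psi = psi_3
--
--     for n in range(4, m + 1):
--         current_psi = (current_psi + (n - 2)) % MOD
--         total_Psi = (total_Psi + current_psi) % MOD
--
--     return total_Psi
-- ===== SOURCE B (Python) =====
-- MOD = 1_000_000_007
--
-- def compute_Psi(m):
--     if m < 3:
--         return 7
--     return (6 * (m - 2) + m * (m - 1) * (m - 2) // 6) % MOD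
-- ===== Notes on version B (the rewrite author's own statement) =====
-- stated objective: faster
-- what changed: Replaced the O(m) accumulation loop by the closed-form formula total(m) = 6*(m-2) + C(m,3) (exact integer division), reduced once modulo 1_000_000_007.
import Mathlib
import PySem

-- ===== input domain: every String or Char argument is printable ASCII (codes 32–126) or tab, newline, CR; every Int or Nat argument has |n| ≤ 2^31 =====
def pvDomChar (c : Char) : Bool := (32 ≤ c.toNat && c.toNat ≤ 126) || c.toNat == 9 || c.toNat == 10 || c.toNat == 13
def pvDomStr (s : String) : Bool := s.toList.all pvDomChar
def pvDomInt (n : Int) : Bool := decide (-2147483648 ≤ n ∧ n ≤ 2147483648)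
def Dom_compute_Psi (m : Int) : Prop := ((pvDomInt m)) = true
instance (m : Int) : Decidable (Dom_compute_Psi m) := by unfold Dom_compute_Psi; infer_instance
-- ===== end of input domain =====

-- B replaces A's O(m) loop by the closed form 6*(m-2) + C(m,3) reduced modulo 1_000_000_007 (objective: faster).

-- ===== PORT A =====
def compute_Psi (m : Int) : Int :=
  ((PySem.List.pyRange 4 (m + 1) 1).foldl
    (fun (s : Int × Int) n =>
      let c := PySem.Int.mod (s.1 + (n - 2)) 1000000007
      (c, PySem.Int.mod (s.2 + c) 1000000007))
    (7, 7)).2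

-- ===== PORT B =====
def compute_Psi_alt (m : Int) : Int :=
  if m < 3 then 7
  else PySem.Int.mod (6 * (m - 2) + PySem.Int.floordiv (m * (m - 1) * (m - 2)) 6) 1000000007

-- ===== PRECONDITION & SPEC =====
def Spec_compute_Psi (m : Int) (out : Int) : Prop := out = compute_Psi_alt m
instance (m : Int) (out : Int) : Decidable (Spec_compute_Psi m out) := by unfold Spec_compute_Psi; infer_instance

-- ===== CLAIM (what is proved, stated in full; the proofs are below) =====
def Claim_equal_compute_Psi : Prop := ∀ (m : Int), Dom_compute_Psi m → Spec_compute_Psi m (compute_Psi m)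

-- ===== LEMMAS AND PROOFS =====

-- the exact (unreduced) sequence values, indexed by k with n = k + 3
def psiN : Nat → Int
  | 0 => 7
  | k + 1 => psiN k + (k + 2)

def totN : Nat → Int
  | 0 => 7
  | k + 1 => totN k + (psiN k + (k + 2))

theorem fold_eq (k : Nat) :
    ((PySem.List.pyRange 4 (4 + k) 1).foldl
      (fun (s : Int × Int) n =>
        let c := PySem.Int.mod (s.1 + (n - 2)) 1000000007
        (c, PySem.Int.mod (s.2 + c) 1000000007))
      (7, 7)) = (PySem.Int.mod (psiN k) 1000000007, PySem.Int.mod (totN k) 1000000007) := by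
  induction k with
  | zero =>
    simp [psiN, totN]
  | succ k ih =>
    have h4 : (4 : Int) + (k + 1 : Nat) = (4 + (k : Int)) + 1 := by push_cast; ring
    rw [h4, PySem.List.pyRange_one_succ_right (by omega), List.foldl_append, ih]
    simp only [List.foldl, psiN, totN, PySem.Int.mod_eq_emod_of_pos (by norm_num : (0:Int) < 1000000007)]
    rw [Prod.mk.injEq]
    refine ⟨by omega, by omega⟩

theorem closed_form (k : Nat) :
    2 * psiN k = (k + 2) * (k + 1) + 12 ∧
    6 * totN k = (k + 3) * (k + 2) * (k + 1) + 36 * (k + 1) := by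
  induction k with
  | zero => simp [psiN, totN]
  | succ k ih =>
    obtain ⟨h1, h2⟩ := ih
    constructor
    · simp only [psiN]; push_cast; ring_nf; ring_nf at h1; omega
    · simp only [totN]; push_cast; ring_nf; ring_nf at h1 h2; omega

-- ===== VERDICT (by name: the statement is the Claim_ definition above) =====
theorem compute_Psi_spec : Claim_equal_compute_Psi := by
  intro m _
  unfold Spec_compute_Psi compute_Psi compute_Psi_alt
  by_cases hm : m < 3
  · rw [if_pos hm, PySem.List.pyRange_one_eq_nil (by omega)]
    simp
  · rw [if_neg hm]
    obtain ⟨k, hk⟩ : ∃ k : Nat, m = 3 + (k : Int) :=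
      ⟨(m - 3).toNat, by omega⟩
    subst hk
    have h1 : (3 : Int) + (k : Int) + 1 = 4 + (k : Nat) := by omega
    rw [h1, fold_eq]
    obtain ⟨hp, ht⟩ := closed_form k
    have hprod : (3 + (k:Int)) * (3 + (k:Int) - 1) * (3 + (k:Int) - 2)
        = 6 * (totN k - 6 * ((k:Int) + 1)) := by ring_nf; ring_nf at ht; omega
    rw [PySem.Int.floordiv_eq_ediv_of_pos (by norm_num), hprod,
      Int.mul_ediv_cancel_left _ (by norm_num : (6:Int) ≠ 0)]
    ring_nf
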